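-- pv_equiv track=rewrite | github.com/fundoop/customerlosing_prediction | model.py | result
-- ===== SOURCE A (Python) =====
-- def result(dataa,datab):
--     tmp=[0,0,0,0]
--     for i in range(len(dataa)):
--         if dataa[i]==1 and datab[i]==1:tmp[0]+=1
--         elif dataa[i]==1 and datab[i]==0:tmp[1]+=1
--         elif dataa[i]==0 and datab[i]==0:tmp[2]+=1
--         elif dataa[i]==0 and datab[i]==1:tmp[3]+=1
--     return tmp
-- ===== SOURCE B (Python) =====
-- def result(dataa, datab):
--     pairs = [(dataa[i], datab[i]) for i in range(len(dataa))]
--     return [pairs.count(p) for p in ((1, 1), (1, 0), (0, 0), (0, 1))]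
-- ===== Notes on version B (the rewrite author's own statement) =====
-- stated objective: idiomatic
-- what changed: Replaces the single pass with four branch counters by staged passes: first materialise the list of (dataa[i], datab[i]) pairs, then take four independent counting scans pairs.count(p) for the four binary keys.
-- outside the precondition, e.g. on result([2], []): A returns [0, 0, 0, 0], B raises IndexError
import Mathlib
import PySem

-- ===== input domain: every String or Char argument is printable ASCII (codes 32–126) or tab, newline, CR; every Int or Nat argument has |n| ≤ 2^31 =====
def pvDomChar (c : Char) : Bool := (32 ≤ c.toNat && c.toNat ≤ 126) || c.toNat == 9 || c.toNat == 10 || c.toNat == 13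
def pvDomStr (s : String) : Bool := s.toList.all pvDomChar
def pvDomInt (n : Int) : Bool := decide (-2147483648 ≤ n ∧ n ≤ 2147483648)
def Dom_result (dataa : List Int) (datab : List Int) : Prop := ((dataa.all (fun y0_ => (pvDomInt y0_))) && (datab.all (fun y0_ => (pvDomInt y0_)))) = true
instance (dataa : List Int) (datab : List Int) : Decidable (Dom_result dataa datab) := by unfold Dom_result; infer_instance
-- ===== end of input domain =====

-- B replaces A's one-pass four-counter elif cascade by staged passes: build the pair list once, then four independent counting scans (idiomatic; same cost).


-- ===== PORT A =====
def result (dataa : List Int) (datab : List Int) : List Int :=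
  (PySem.List.pyRange 0 dataa.length 1).foldl (fun tmp i =>
    let a := PySem.List.pyGetD dataa i 0
    let b := PySem.List.pyGetD datab i 0
    if a = 1 ∧ b = 1 then tmp.set 0 (tmp.getD 0 0 + 1)
    else if a = 1 ∧ b = 0 then tmp.set 1 (tmp.getD 1 0 + 1)
    else if a = 0 ∧ b = 0 then tmp.set 2 (tmp.getD 2 0 + 1)
    else if a = 0 ∧ b = 1 then tmp.set 3 (tmp.getD 3 0 + 1)
    else tmp) [0, 0, 0, 0]

-- ===== PORT B =====
def result_alt (dataa : List Int) (datab : List Int) : List Int :=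
  let pairs := (PySem.List.pyRange 0 dataa.length 1).map
    (fun i => (PySem.List.pyGetD dataa i 0, PySem.List.pyGetD datab i 0))
  ([((1 : Int), (1 : Int)), (1, 0), (0, 0), (0, 1)]).map
    (fun p => (PySem.List.count pairs p : Int))

-- ===== PRECONDITION & SPEC =====
-- Pre_ excludes datab shorter than dataa: there A raises IndexError, except when every
-- overhanging position of dataa is non-binary (the elif guards short-circuit and A returns),
-- while B's pair construction always reads datab[i] and raises.
def Pre_result (dataa : List Int) (datab : List Int) : Prop := dataa.length ≤ datab.length
instance (dataa : List Int) (datab : List Int) : Decidable (Pre_result dataa datab) := by unfold Pre_result; infer_instance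
def pvWitness_result : List Int × List Int := ([1, 0, 1, 2, 0], [1, 1, 0, 1, 0])
def Spec_result (dataa : List Int) (datab : List Int) (out : List Int) : Prop := out = result_alt dataa datab
instance (dataa : List Int) (datab : List Int) (out : List Int) : Decidable (Spec_result dataa datab out) := by unfold Spec_result; infer_instance

-- ===== CLAIM (what is proved, stated in full; the proofs are below) =====
def Claim_equal_result : Prop := ∀ (dataa : List Int) (datab : List Int), Dom_result dataa datab → Pre_result dataa datab → Spec_result dataa datab (result dataa datab)

-- ===== LEMMAS AND PROOFS =====

-- A's loop over any index list, from an arbitrary four-counter state, adds the four pair counts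
theorem pvFold_eq (l : List Int) (f g : Int → Int) (w x y z : Int) :
    l.foldl (fun tmp i =>
      let a := f i
      let b := g i
      if a = 1 ∧ b = 1 then tmp.set 0 (tmp.getD 0 0 + 1)
      else if a = 1 ∧ b = 0 then tmp.set 1 (tmp.getD 1 0 + 1)
      else if a = 0 ∧ b = 0 then tmp.set 2 (tmp.getD 2 0 + 1)
      else if a = 0 ∧ b = 1 then tmp.set 3 (tmp.getD 3 0 + 1)
      else tmp) [w, x, y, z] =
    [w + ((l.map (fun i => (f i, g i))).count ((1 : Int), (1 : Int)) : Int),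
     x + ((l.map (fun i => (f i, g i))).count ((1 : Int), (0 : Int)) : Int),
     y + ((l.map (fun i => (f i, g i))).count ((0 : Int), (0 : Int)) : Int),
     z + ((l.map (fun i => (f i, g i))).count ((0 : Int), (1 : Int)) : Int)] := by
  induction l generalizing w x y z with
  | nil => simp
  | cons i l ih =>
    simp only [List.foldl, List.map, List.count_cons]
    split_ifs with h1 h2 h3 h4 <;>
      (try simp only [List.set_cons_zero, List.set_cons_succ, List.getD_cons_zero,
        List.getD_cons_succ]) <;>
      rw [ih] <;>
      simp only [beq_iff_eq, Prod.mk.injEq, List.cons.injEq, and_true] at * <;>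
      push_cast <;> omega

-- ===== VERDICT (by name: the statement is the Claim_ definition above) =====
theorem result_spec : Claim_equal_result := by
  intro dataa datab _ _
  show result dataa datab = result_alt dataa datab
  have h := pvFold_eq (PySem.List.pyRange 0 dataa.length 1)
      (fun i => PySem.List.pyGetD dataa i 0) (fun i => PySem.List.pyGetD datab i 0)
      0 0 0 0
  simpa [result, result_alt, PySem.List.count_eq] using h
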